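-- pv_equiv track=rewrite | github.com/TotoMC-13/introduccion-a-la-programacion | Parciales Python/Parcial 2/soluciones.py | stock_productos
-- ===== SOURCE A (Python) =====
-- def stock_productos(stock_cambios: list[tuple[str, int]]) -> dict[str, tuple[int, int]]:
--     stocks_pasados: dict[str, list[int]]  = {} # {"manzana": [minimo stock, maximo stock]}
--     res: dict[str, tuple[int, int]] = {}
--
--     for producto in stock_cambios:
--         nombre: str = producto[0]
--         stock_actual: int = producto[1]
--
--         if nombre in stocks_pasados:
--             minimo_pasado: int = stocks_pasados[nombre][0]
--             maximo_pasado: int = stocks_pasados[nombre][1]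
--
--             if stock_actual < minimo_pasado:
--                 stocks_pasados[nombre][0] = stock_actual
--             elif stock_actual > maximo_pasado:
--                 stocks_pasados[nombre][1] = stock_actual
--         else:
--             stocks_pasados[nombre] = [stock_actual, stock_actual]
--
--     for producto in stocks_pasados:
--         stock_minimo = stocks_pasados[producto][0]
--         stock_maximo = stocks_pasados[producto][1]
--
--         res[producto] = (stock_minimo, stock_maximo)
--
--     return res
-- ===== SOURCE B (Python) =====
-- def stock_productos(stock_cambios: list[tuple[str, int]]) -> dict[str, tuple[int, int]]:
--     grupos: dict[str, list[int]] = {}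
--     for nombre, stock in stock_cambios:
--         if nombre in grupos:
--             grupos[nombre].append(stock)
--         else:
--             grupos[nombre] = [stock]
--     return {nombre: (min(valores), max(valores)) for nombre, valores in grupos.items()}
-- ===== Notes on version B (the rewrite author's own statement) =====
-- stated objective: simpler
-- what changed: Instead of maintaining running min/max pairs with hand-written comparisons, B groups all stock values per product in one pass and then summarises each group with the built-in min and max.
import Mathlib
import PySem

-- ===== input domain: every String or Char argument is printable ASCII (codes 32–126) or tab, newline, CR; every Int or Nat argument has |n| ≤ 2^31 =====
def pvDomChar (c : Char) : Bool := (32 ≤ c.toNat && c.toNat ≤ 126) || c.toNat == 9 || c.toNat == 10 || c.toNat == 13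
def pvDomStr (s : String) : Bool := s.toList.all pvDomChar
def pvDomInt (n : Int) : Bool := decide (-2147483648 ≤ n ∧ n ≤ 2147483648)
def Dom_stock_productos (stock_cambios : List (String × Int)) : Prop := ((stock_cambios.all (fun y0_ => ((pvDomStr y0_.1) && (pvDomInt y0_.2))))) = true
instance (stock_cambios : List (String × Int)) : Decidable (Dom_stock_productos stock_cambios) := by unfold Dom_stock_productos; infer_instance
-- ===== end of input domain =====

-- B replaces A's running min/max updates by grouping all values per product and summarising with min/max (objective: simpler).


-- ===== PORT A =====
-- one loop step of A: update the running (min, max) pair for this product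
def stockStepA (d : PySem.Dict String (Int × Int)) (p : String × Int) : PySem.Dict String (Int × Int) :=
  match d.get? p.1 with
  | some mm =>
      if p.2 < mm.1 then d.insert p.1 (p.2, mm.2)
      else if p.2 > mm.2 then d.insert p.1 (mm.1, p.2)
      else d
  | none => d.insert p.1 (p.2, p.2)

def stock_productos (stock_cambios : List (String × Int)) : List (String × Int × Int) :=
  let stocks_pasados := stock_cambios.foldl stockStepA PySem.Dict.empty
  -- second loop: res[producto] = (stock_minimo, stock_maximo)
  let res := stocks_pasados.keys.foldl
    (fun r producto =>
      r.insert producto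
        ((stocks_pasados.getD producto (0, 0)).1, (stocks_pasados.getD producto (0, 0)).2))
    PySem.Dict.empty
  res.items

-- ===== PORT B =====
-- Python's min/max over a nonempty int list (0 is never reached: groups are nonempty)
def pyMinList : List Int → Int
  | [] => 0
  | x :: xs => xs.foldl min x

def pyMaxList : List Int → Int
  | [] => 0
  | x :: xs => xs.foldl max x

def stockStepB (g : PySem.Dict String (List Int)) (p : String × Int) : PySem.Dict String (List Int) :=
  match g.get? p.1 with
  | some l => g.insert p.1 (l ++ [p.2])
  | none => g.insert p.1 [p.2]

def stock_productos_alt (stock_cambios : List (String × Int)) : List (String × Int × Int) :=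
  let grupos := stock_cambios.foldl stockStepB PySem.Dict.empty
  grupos.items.map (fun kv => (kv.1, pyMinList kv.2, pyMaxList kv.2))

-- ===== PRECONDITION & SPEC =====
def Spec_stock_productos (stock_cambios : List (String × Int)) (out : List (String × Int × Int)) : Prop := out = stock_productos_alt stock_cambios
instance (stock_cambios : List (String × Int)) (out : List (String × Int × Int)) : Decidable (Spec_stock_productos stock_cambios out) := by unfold Spec_stock_productos; infer_instance

-- ===== CLAIM (what is proved, stated in full; the proofs are below) =====
def Claim_equal_stock_productos : Prop := ∀ (stock_cambios : List (String × Int)), Dom_stock_productos stock_cambios → Spec_stock_productos stock_cambios (stock_productos stock_cambios)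

-- ===== LEMMAS AND PROOFS =====
-- the summary of one group
def stockF (kv : String × List Int) : String × Int × Int := (kv.1, pyMinList kv.2, pyMaxList kv.2)

-- invariant relating A's dict to B's dict during the fold
def StockInv (g : PySem.Dict String (List Int)) (d : PySem.Dict String (Int × Int)) : Prop :=
  d.items = g.items.map stockF ∧ g.keys.Nodup ∧ ∀ kv ∈ g.items, kv.2 ≠ []

lemma foldl_min_le_foldl_max (xs : List Int) : ∀ a b : Int, a ≤ b → xs.foldl min a ≤ xs.foldl max b := by
  induction xs with
  | nil => intro a b h; simpa using h
  | cons y ys ih =>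
      intro a b h
      simp only [List.foldl]
      exact ih _ _ (le_trans (min_le_left a y) (le_trans h (le_max_left b y)))

lemma pyMin_le_pyMax (l : List Int) (h : l ≠ []) : pyMinList l ≤ pyMaxList l := by
  cases l with
  | nil => simp at h
  | cons x xs => exact foldl_min_le_foldl_max xs x x le_rfl

lemma pyMin_append (l : List Int) (s : Int) (h : l ≠ []) :
    pyMinList (l ++ [s]) = min (pyMinList l) s := by
  cases l with
  | nil => simp at h
  | cons x xs => simp [pyMinList, List.foldl_append]

lemma pyMax_append (l : List Int) (s : Int) (h : l ≠ []) :
    pyMaxList (l ++ [s]) = max (pyMaxList l) s := by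
  cases l with
  | nil => simp at h
  | cons x xs => simp [pyMaxList, List.foldl_append]

lemma keys_of_items_map (g : PySem.Dict String (List Int)) (d : PySem.Dict String (Int × Int))
    (h : d.items = g.items.map stockF) : d.keys = g.keys := by
  simp only [PySem.Dict.keys, h, List.map_map]
  rfl

lemma get?_of_items_map (g : PySem.Dict String (List Int)) (d : PySem.Dict String (Int × Int))
    (h : d.items = g.items.map stockF) (k : String) :
    d.get? k = (g.get? k).map (fun l => (pyMinList l, pyMaxList l)) := by
  obtain ⟨dits⟩ := d
  obtain ⟨gits⟩ := g
  subst h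
  induction gits with
  | nil => rfl
  | cons kv rest ih =>
      obtain ⟨kn, kl⟩ := kv
      simp only [List.map_cons]
      rw [show stockF (kn, kl) = (kn, pyMinList kl, pyMaxList kl) from rfl]
      simp only [PySem.Dict.get?_mk_cons]
      by_cases hk : kn = k
      · simp [hk]
      · simp only [beq_iff_eq, hk, if_false]; exact ih

-- inserting at a contained key substitutes the (constant) new pair in the items list
lemma items_insert_subst {ν : Type} (d : PySem.Dict String ν) (k : String) (v : ν)
    (hc : d.contains k = true) :
    (d.insert k v).items = d.items.map (fun q => if q.1 = k then (k, v) else q) := by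
  rw [PySem.Dict.items_insert_of_contains d v hc]
  apply List.map_congr_left
  intro q _
  by_cases hq : q.1 = k <;> simp [hq]

lemma contains_of_get?_eq_some {ν : Type} (d : PySem.Dict String ν) (k : String) (v : ν)
    (h : d.get? k = some v) : d.contains k = true := by
  rw [PySem.Dict.contains_eq_isSome_get?, h]; rfl

lemma nonempty_after_insert (g : PySem.Dict String (List Int)) (k : String) (v : List Int)
    (hv : v ≠ []) (hne : ∀ kv ∈ g.items, kv.2 ≠ []) :
    ∀ kv ∈ (g.insert k v).items, kv.2 ≠ [] := by
  intro kv hkv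
  rcases (PySem.Dict.mem_items_insert g k v kv).1 hkv with hkv | ⟨hkv, _⟩
  · rw [hkv]; exact hv
  · exact hne kv hkv

lemma inv_step (g : PySem.Dict String (List Int)) (d : PySem.Dict String (Int × Int))
    (p : String × Int) (h : StockInv g d) : StockInv (stockStepB g p) (stockStepA d p) := by
  obtain ⟨hitems, hnd, hne⟩ := h
  have hget := get?_of_items_map g d hitems p.1
  unfold stockStepA stockStepB
  cases hgl : g.get? p.1 with
  | none =>
      rw [hgl] at hget
      simp only [Option.map_none] at hget
      rw [hget]
      have hc : g.contains p.1 = false := by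
        rw [PySem.Dict.contains_eq_isSome_get?, hgl]; rfl
      have hcd : d.contains p.1 = false := by
        rw [PySem.Dict.contains_eq_isSome_get?, hget]; rfl
      refine ⟨?_, PySem.Dict.nodup_keys_insert _ _ _ hnd, nonempty_after_insert g p.1 [p.2] (by simp) hne⟩
      rw [PySem.Dict.items_insert_of_not_contains d (p.2, p.2) hcd,
          PySem.Dict.items_insert_of_not_contains g [p.2] hc, List.map_append, hitems]
      rfl
  | some l =>
      rw [hgl] at hget
      simp only [Option.map_some] at hget
      rw [hget]
      dsimp only
      have hlne : l ≠ [] := hne (p.1, l) (PySem.Dict.mem_items_of_get?_eq_some g hgl)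
      have hc : g.contains p.1 = true := contains_of_get?_eq_some g p.1 l hgl
      have hcd : d.contains p.1 = true :=
        contains_of_get?_eq_some d p.1 (pyMinList l, pyMaxList l) hget
      have hmm : pyMinList l ≤ pyMaxList l := pyMin_le_pyMax l hlne
      have hFapp : stockF (p.1, l ++ [p.2]) =
          (p.1, min (pyMinList l) p.2, max (pyMaxList l) p.2) := by
        simp [stockF, pyMin_append l p.2 hlne, pyMax_append l p.2 hlne]
      have hsubst : ∀ (v : Int × Int), stockF (p.1, l ++ [p.2]) = (p.1, v) →
          StockInv (g.insert p.1 (l ++ [p.2])) (d.insert p.1 v) := by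
        intro v hv
        refine ⟨?_, PySem.Dict.nodup_keys_insert _ _ _ hnd,
          nonempty_after_insert g p.1 (l ++ [p.2]) (by simp) hne⟩
        rw [items_insert_subst d p.1 v hcd, items_insert_subst g p.1 (l ++ [p.2]) hc,
            hitems, List.map_map, List.map_map]
        apply List.map_congr_left
        intro q _
        by_cases hq : q.1 = p.1
        · simp only [Function.comp_apply, stockF, hq, ← hv]; simp
        · simp [stockF, hq]
      split_ifs with hlt hgt
      · exact hsubst (p.2, pyMaxList l) (by rw [hFapp, min_eq_right (le_of_lt hlt),
          max_eq_left (le_trans (le_of_lt hlt) hmm)])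
      · exact hsubst (pyMinList l, p.2) (by rw [hFapp, min_eq_left (le_trans hmm (le_of_lt hgt)),
          max_eq_right (le_of_lt hgt)])
      · -- in-range value: A leaves d unchanged, B's appended group has the same summary
        refine ⟨?_, PySem.Dict.nodup_keys_insert _ _ _ hnd,
          nonempty_after_insert g p.1 (l ++ [p.2]) (by simp) hne⟩
        rw [items_insert_subst g p.1 (l ++ [p.2]) hc, hitems, List.map_map]
        apply List.map_congr_left
        intro q hq
        by_cases hqk : q.1 = p.1
        · have hql : q.2 = l := by
            have := PySem.Dict.get?_of_mem_items g hq hnd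
            rw [hqk, hgl] at this
            exact (Option.some_injective _ this).symm
          have hq' : q = (p.1, l) := by
            obtain ⟨q1, q2⟩ := q
            simp only at hqk hql
            rw [hqk, hql]
          simp [hq', stockF, pyMin_append l p.2 hlne, pyMax_append l p.2 hlne,
            min_eq_left (le_of_not_gt hlt), max_eq_left (le_of_not_gt hgt)]
        · simp only [Function.comp_apply, stockF, if_neg hqk]

lemma inv_foldl (xs : List (String × Int)) :
    ∀ (g : PySem.Dict String (List Int)) (d : PySem.Dict String (Int × Int)), StockInv g d →
    StockInv (xs.foldl stockStepB g) (xs.foldl stockStepA d) := by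
  induction xs with
  | nil => intro g d h; exact h
  | cons p ps ih => intro g d h; exact ih _ _ (inv_step g d p h)

-- A's second loop reproduces stocks_pasados.items
lemma res_items (st : PySem.Dict String (Int × Int)) (hnd : st.keys.Nodup) :
    (st.keys.foldl
      (fun r producto => r.insert producto ((st.getD producto (0, 0)).1, (st.getD producto (0, 0)).2))
      PySem.Dict.empty).items = st.items := by
  have h := PySem.Dict.items_foldl_insert_fresh st.keys (fun producto => producto)
      (fun producto => ((st.getD producto (0, 0)).1, (st.getD producto (0, 0)).2))
      PySem.Dict.empty
      (fun a _ => PySem.Dict.contains_empty a) (by simpa using hnd)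
  rw [h, PySem.Dict.items_eq_map_keys st hnd (0, 0)]
  simp [PySem.Dict.empty]

-- ===== VERDICT (by name: the statement is the Claim_ definition above) =====
theorem stock_productos_spec : Claim_equal_stock_productos := by
  intro sc _
  unfold Spec_stock_productos stock_productos stock_productos_alt
  have hinv : StockInv (sc.foldl stockStepB PySem.Dict.empty) (sc.foldl stockStepA PySem.Dict.empty) := by
    apply inv_foldl
    refine ⟨by simp [PySem.Dict.empty], by simp, by simp [PySem.Dict.empty]⟩
  obtain ⟨hitems, hnd, _⟩ := hinv
  have hndA : (sc.foldl stockStepA PySem.Dict.empty).keys.Nodup := by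
    rw [keys_of_items_map _ _ hitems]; exact hnd
  rw [res_items _ hndA, hitems]
  rfl
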